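-- pv_equiv track=rewrite | github.com/KevinKipkoechMutai/data-structs-and-algo-prep | password-hash/password-hash.py | authEvents
-- ===== SOURCE A (Python) =====
-- def authEvents(events):
--     p = 131
--     M = 1000000007
--
--     password_hash = 0
--
--     def hash_string(s):
--         hash_val = 0
--         for c in s:
--             hash_val = (hash_val * p + ord(c)) % M
--         return hash_val
--
--     def authorize(x, current_hash):
--         if x == current_hash:
--             return 1
--         for i in range(128):  # ASCII range
--             new_hash = (current_hash * p + i) % M
--             if new_hash == x:
--                 return 1
--         return 0
--
--     result = []
--     for command, param in events:
--         if command == "setPassword":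
--             password_hash = hash_string(param)
--         elif command == "authorize":
--             x = int(param)
--             result.append(authorize(x, password_hash))
--
--     return result
-- ===== SOURCE B (Python) =====
-- def authEvents(events):
--     # Same rolling-hash state machine, but authorize is O(1): invert the hash
--     # algebraically instead of scanning all 128 candidate appended characters.
--     p = 131
--     M = 1000000007
--     out = []
--     h = 0
--     for command, param in events:
--         if command == "setPassword":
--             h = 0
--             for c in param:
--                 h = (h * p + ord(c)) % M
--         elif command == "authorize":
--             x = int(param)
--             out.append(1 if x == h or (0 <= x < M and (x - h * p) % M < 128) else 0)
--     return out
-- ===== Notes on version B (the rewrite author's own statement) =====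
-- stated objective: faster
-- what changed: authorize's 128-iteration scan over candidate appended characters is replaced by a direct O(1) algebraic inversion of the rolling hash: answer 1 iff x == h or (0 <= x < M and (x - h*p) % M < 128); the helper functions are flattened into one loop.
import Mathlib
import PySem

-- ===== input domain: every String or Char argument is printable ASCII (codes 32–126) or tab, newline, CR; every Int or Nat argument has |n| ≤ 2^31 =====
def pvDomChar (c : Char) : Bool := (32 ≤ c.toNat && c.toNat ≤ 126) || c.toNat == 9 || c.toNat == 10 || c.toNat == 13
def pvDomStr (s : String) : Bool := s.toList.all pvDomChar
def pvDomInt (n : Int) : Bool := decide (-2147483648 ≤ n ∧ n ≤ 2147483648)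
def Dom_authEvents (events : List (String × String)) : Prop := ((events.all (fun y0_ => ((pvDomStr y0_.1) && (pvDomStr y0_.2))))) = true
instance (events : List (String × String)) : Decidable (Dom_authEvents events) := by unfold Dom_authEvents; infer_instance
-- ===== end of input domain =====

-- B replaces authorize's 128-iteration scan by an O(1) algebraic inversion of the rolling hash (faster).

-- ===== PORT A =====
-- hash_string: rolling hash over the characters of s
def hashStringA (s : String) : Int :=
  s.toList.foldl (fun hv c => PySem.Int.mod (hv * 131 + (c.toNat : Int)) 1000000007) 0

-- the 'for i in range(128)' loop of authorize, with early return 1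
def authScanA (x current : Int) : List Int → Int
  | [] => 0
  | i :: rest =>
      if PySem.Int.mod (current * 131 + i) 1000000007 = x then 1 else authScanA x current rest

def authorizeA (x current : Int) : Int :=
  if x = current then 1 else authScanA x current (PySem.List.pyRange 0 128 1)

def authEvents (events : List (String × String)) : List Int :=
  (events.foldl (fun (st : Int × List Int) ev =>
      if ev.1 = "setPassword" then (hashStringA ev.2, st.2)
      else if ev.1 = "authorize" then
        match PySem.Int.ofStr? ev.2 with
        | some x => (st.1, st.2 ++ [authorizeA x st.1])
        | none => st          -- Python raises ValueError here; excluded by Pre_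
      else st) (0, [])).2

-- ===== PORT B =====
def authEvents_alt (events : List (String × String)) : List Int :=
  (events.foldl (fun (st : Int × List Int) ev =>
      if ev.1 = "setPassword" then
        (ev.2.toList.foldl (fun h c => PySem.Int.mod (h * 131 + (c.toNat : Int)) 1000000007) 0, st.2)
      else if ev.1 = "authorize" then
        match PySem.Int.ofStr? ev.2 with
        | some x =>
            (st.1, st.2 ++ [if x = st.1 ∨
                (0 ≤ x ∧ x < 1000000007 ∧ PySem.Int.mod (x - st.1 * 131) 1000000007 < 128)
              then 1 else 0])
        | none => st          -- Python raises ValueError here; excluded by Pre_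
      else st) (0, [])).2

-- ===== PRECONDITION & SPEC =====
-- Pre_ excludes exactly the inputs on which Python's int(param) raises ValueError at an "authorize"
-- event: the param must be an int literal (optional surrounding whitespace, optional sign, digits with
-- single underscores between digits).
def pvDigitsTail : List Char → Bool
  | [] => true
  | c :: rest =>
      if c.toNat == 95 then  -- code 95 is the underscore digit separator
        match rest with
        | c2 :: rest2 => c2.isDigit && pvDigitsTail rest2
        | [] => false
      else c.isDigit && pvDigitsTail rest

def pvIntBody : List Char → Bool
  | [] => false
  | c :: rest => c.isDigit && pvDigitsTail rest

def pvIsIntLiteral (s : String) : Bool :=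
  match ((s.toList.dropWhile Char.isWhitespace).reverse.dropWhile Char.isWhitespace).reverse with
  | '+' :: rest => pvIntBody rest
  | '-' :: rest => pvIntBody rest
  | rest => pvIntBody rest

def Pre_authEvents (events : List (String × String)) : Prop :=
  ∀ ev ∈ events, ev.1 = "authorize" → pvIsIntLiteral ev.2 = true
instance (events : List (String × String)) : Decidable (Pre_authEvents events) := by
  unfold Pre_authEvents; infer_instance

def pvWitness_authEvents : (List (String × String)) :=
  [("setPassword", "ab"), ("authorize", "12867"), ("authorize", "-3")]

def Spec_authEvents (events : List (String × String)) (out : List Int) : Prop := out = authEvents_alt events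
instance (events : List (String × String)) (out : List Int) : Decidable (Spec_authEvents events out) := by unfold Spec_authEvents; infer_instance

-- ===== CLAIM (what is proved, stated in full; the proofs are below) =====
def Claim_equal_authEvents : Prop := ∀ (events : List (String × String)), Dom_authEvents events → Pre_authEvents events → Spec_authEvents events (authEvents events)

-- ===== LEMMAS AND PROOFS =====

-- the scan returns 1 iff some i in the list hits the target hash
theorem authScanA_eq_one_iff (x current : Int) (l : List Int) :
    authScanA x current l = if (∃ i ∈ l, (current * 131 + i) % 1000000007 = x) then 1 else 0 := by
  induction l with
  | nil => simp [authScanA]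
  | cons a t ih =>
      simp only [authScanA,
        PySem.Int.mod_eq_emod_of_pos (by norm_num : (0:Int) < 1000000007), ih]
      by_cases h : (current * 131 + a) % 1000000007 = x
      · simp [h]
      · simp [h]

-- the algebraic inversion is exact: a 128-step scan hit exists iff the closed-form condition holds
theorem authorize_pointwise (x current : Int) :
    authorizeA x current =
      if x = current ∨ (0 ≤ x ∧ x < 1000000007 ∧ PySem.Int.mod (x - current * 131) 1000000007 < 128)
      then 1 else 0 := by
  unfold authorizeA
  by_cases hx : x = current
  · simp [hx]
  · rw [authScanA_eq_one_iff]
    have key : (∃ i ∈ PySem.List.pyRange 0 128 1, (current * 131 + i) % 1000000007 = x) ↔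
        (0 ≤ x ∧ x < 1000000007 ∧ (x - current * 131) % 1000000007 < 128) := by
      constructor
      · rintro ⟨i, hmem, hm⟩
        obtain ⟨h0, h128⟩ := PySem.List.mem_pyRange_one.mp hmem
        have hb := Int.emod_nonneg (current * 131 + i) (by norm_num : (1000000007:Int) ≠ 0)
        have hb' := Int.emod_lt_of_pos (current * 131 + i) (by norm_num : (0:Int) < 1000000007)
        refine ⟨by omega, by omega, ?_⟩
        have : (x - current * 131) % 1000000007 = i := by
          rw [← hm]; omega
        omega
      · rintro ⟨h0, hM, hlt⟩
        refine ⟨(x - current * 131) % 1000000007,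
          PySem.List.mem_pyRange_one.mpr ⟨Int.emod_nonneg _ (by norm_num), hlt⟩, ?_⟩
        omega
    simp only [hx, false_or, key,
      PySem.Int.mod_eq_emod_of_pos (by norm_num : (0:Int) < 1000000007)]
    simp

-- the two event folds agree step by step
theorem fold_eq (events : List (String × String)) (st : Int × List Int) :
    (events.foldl (fun (st : Int × List Int) ev =>
      if ev.1 = "setPassword" then (hashStringA ev.2, st.2)
      else if ev.1 = "authorize" then
        match PySem.Int.ofStr? ev.2 with
        | some x => (st.1, st.2 ++ [authorizeA x st.1])
        | none => st
      else st) st) =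
    (events.foldl (fun (st : Int × List Int) ev =>
      if ev.1 = "setPassword" then
        (ev.2.toList.foldl (fun h c => PySem.Int.mod (h * 131 + (c.toNat : Int)) 1000000007) 0, st.2)
      else if ev.1 = "authorize" then
        match PySem.Int.ofStr? ev.2 with
        | some x =>
            (st.1, st.2 ++ [if x = st.1 ∨
                (0 ≤ x ∧ x < 1000000007 ∧ PySem.Int.mod (x - st.1 * 131) 1000000007 < 128)
              then 1 else 0])
        | none => st
      else st) st) := by
  induction events generalizing st with
  | nil => rfl
  | cons ev t ih =>
      simp only [List.foldl_cons]
      rw [← ih]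
      congr 1
      by_cases h1 : ev.1 = "setPassword"
      · simp [h1, hashStringA]
      · by_cases h2 : ev.1 = "authorize"
        · rw [if_neg h1, if_neg h1, if_pos h2, if_pos h2]
          cases PySem.Int.ofStr? ev.2 with
          | none => rfl
          | some x => simp [authorize_pointwise]
        · simp [h1, h2]

-- ===== VERDICT (by name: the statement is the Claim_ definition above) =====
theorem authEvents_spec : Claim_equal_authEvents := by
  intro events _ _
  unfold Spec_authEvents authEvents authEvents_alt
  rw [fold_eq]
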